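-- pv_equiv track=rewrite | github.com/microsoft/genalog | genalog/text/conll_format.py | get_sentences_from_iob_format
-- ===== SOURCE A (Python) =====
-- def get_sentences_from_iob_format(iob_format_str):
--     sentences = []
--     sentence = []
--     for line in iob_format_str:
--         if line.strip() == "":  # if line is empty (sentence separator)
--             sentences.append(sentence)
--             sentence = []
--         else:
--             token = line.split()[0].strip()
--             sentence.append(token)
--     sentences.append(sentence)
--     # filter any empty sentences
--     return list(filter(lambda sentence: len(sentence) > 0, sentences))
-- ===== SOURCE B (Python) =====
-- def get_sentences_from_iob_format(iob_format_str):
--     # Two-pointer run scanner: emit each maximal run of non-blank lines directly,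
--     # skipping blank lines; no flush-accumulator and no final filter pass needed.
--     lines = list(iob_format_str)
--     n = len(lines)
--     sentences = []
--     i = 0
--     while i < n:
--         if lines[i].strip() == "":
--             i += 1
--             continue
--         j = i
--         while j < n and lines[j].strip() != "":
--             j += 1
--         sentences.append([lines[k].split()[0].strip() for k in range(i, j)])
--         i = j
--     return sentences
-- ===== Notes on version B (the rewrite author's own statement) =====
-- stated objective: alternative
-- what changed: Replaces A's flush-accumulator plus trailing append-and-filter with a two-pointer run scanner that skips blank lines and emits each maximal non-blank run as a sentence directly, so no empty sentences are ever created or filtered.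
import Mathlib
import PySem

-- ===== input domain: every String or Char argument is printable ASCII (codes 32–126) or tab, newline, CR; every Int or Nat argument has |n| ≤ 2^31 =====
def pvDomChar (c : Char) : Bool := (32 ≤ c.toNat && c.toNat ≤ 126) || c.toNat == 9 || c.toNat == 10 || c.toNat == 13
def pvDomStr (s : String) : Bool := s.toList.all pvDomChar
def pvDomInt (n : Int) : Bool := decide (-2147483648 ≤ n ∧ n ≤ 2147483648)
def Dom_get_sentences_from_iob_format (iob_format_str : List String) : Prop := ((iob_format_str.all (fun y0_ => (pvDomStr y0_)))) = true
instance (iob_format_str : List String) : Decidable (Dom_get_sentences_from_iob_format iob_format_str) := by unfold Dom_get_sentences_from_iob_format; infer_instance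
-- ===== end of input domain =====

-- B replaces A's flush-accumulator-plus-final-filter with a run scanner that emits each
-- maximal non-blank run directly (alternative decomposition; same return value).
-- ===== PORT A =====
-- token = line.split()[0].strip()  ([0] never raises here: only called on non-blank lines)
def pvTokA (line : String) : String :=
  PySem.Str.strip (((PySem.List.pyGet? (PySem.Str.split₀ line) 0)).getD "")

def pvLoopA (lines : List String) (sentences : List (List String)) (sentence : List String) :
    List (List String) :=
  match lines with
  | [] => (sentences ++ [sentence]).filter (fun s => decide (0 < s.length))
  | l :: rest =>
    if PySem.Str.strip l == "" then pvLoopA rest (sentences ++ [sentence]) []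
    else pvLoopA rest sentences (sentence ++ [pvTokA l])

def get_sentences_from_iob_format (iob_format_str : List String) : List (List String) :=
  pvLoopA iob_format_str [] []

-- ===== PORT B =====
-- B computes tokens the same way as A (line.split()[0].strip()): pvTokA is shared.
def pvNonBlank (line : String) : Bool := !(PySem.Str.strip line == "")

def get_sentences_from_iob_format_alt (iob_format_str : List String) : List (List String) :=
  match iob_format_str with
  | [] => []
  | l :: rest =>
    if PySem.Str.strip l == "" then get_sentences_from_iob_format_alt rest
    else (pvTokA l :: (rest.takeWhile pvNonBlank).map pvTokA)
         :: get_sentences_from_iob_format_alt (rest.dropWhile pvNonBlank)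
termination_by iob_format_str.length
decreasing_by
  all_goals simp
  have := List.length_dropWhile_le pvNonBlank rest
  omega

-- ===== PRECONDITION & SPEC =====
def Spec_get_sentences_from_iob_format (iob_format_str : List String) (out : List (List String)) : Prop := out = get_sentences_from_iob_format_alt iob_format_str
instance (iob_format_str : List String) (out : List (List String)) : Decidable (Spec_get_sentences_from_iob_format iob_format_str out) := by unfold Spec_get_sentences_from_iob_format; infer_instance

-- ===== CLAIM (what is proved, stated in full; the proofs are below) =====
def Claim_equal_get_sentences_from_iob_format : Prop := ∀ (iob_format_str : List String), Dom_get_sentences_from_iob_format iob_format_str → Spec_get_sentences_from_iob_format iob_format_str (get_sentences_from_iob_format iob_format_str)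

-- ===== LEMMAS AND PROOFS =====

-- mid-run state of B's scanner: cur = tokens of the current (possibly empty) open sentence
def pvC (cur : List String) (lines : List String) : List (List String) :=
  match lines with
  | [] => if cur.isEmpty then [] else [cur]
  | l :: rest =>
    if PySem.Str.strip l == "" then (if cur.isEmpty then [] else [cur]) ++ pvC [] rest
    else pvC (cur ++ [pvTokA l]) rest

theorem pvLoopA_eq (lines : List String) :
    ∀ (S : List (List String)) (cur : List String),
      pvLoopA lines S cur = S.filter (fun s => decide (0 < s.length)) ++ pvC cur lines := by
  induction lines with
  | nil =>
    intro S cur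
    simp [pvLoopA, pvC, List.filter_append]
    cases cur <;> simp
  | cons l rest ih =>
    intro S cur
    simp only [pvLoopA, pvC]
    by_cases h : PySem.Str.strip l == ""
    · simp only [h, ih, List.filter_append]
      cases cur <;> simp
    · simp only [if_neg h, ih]

theorem pvC_run (lines : List String) :
    ∀ (cur : List String), cur.isEmpty = false →
      pvC cur lines =
        (cur ++ (lines.takeWhile pvNonBlank).map pvTokA) :: pvC [] (lines.dropWhile pvNonBlank) := by
  induction lines with
  | nil => intro cur h; simp [pvC, h]
  | cons l rest ih =>
    intro cur h
    by_cases hb : PySem.Str.strip l == ""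
    · simp [pvC, hb, h, List.takeWhile, List.dropWhile, pvNonBlank]
    · have hcur : (cur ++ [pvTokA l]).isEmpty = false := by cases cur <;> simp
      simp [pvC, hb, ih _ hcur, List.takeWhile, List.dropWhile, pvNonBlank]

theorem pvAlt_cons (l : String) (rest : List String) :
    get_sentences_from_iob_format_alt (l :: rest) =
      if PySem.Str.strip l == "" then get_sentences_from_iob_format_alt rest
      else (pvTokA l :: (rest.takeWhile pvNonBlank).map pvTokA)
           :: get_sentences_from_iob_format_alt (rest.dropWhile pvNonBlank) := by
  rw [get_sentences_from_iob_format_alt]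

theorem pvC_nil_eq : ∀ (lines : List String),
    pvC [] lines = get_sentences_from_iob_format_alt lines
  | [] => by rw [get_sentences_from_iob_format_alt]; rfl
  | l :: rest => by
    rw [pvAlt_cons]
    by_cases hb : PySem.Str.strip l == ""
    · simp only [pvC, if_pos hb, List.isEmpty_nil, List.nil_append]
      exact pvC_nil_eq rest
    · simp only [pvC, if_neg hb, List.nil_append]
      rw [pvC_run rest [pvTokA l] (by simp), pvC_nil_eq (rest.dropWhile pvNonBlank)]
      rfl
termination_by lines => lines.length
decreasing_by
  all_goals simp
  have := List.length_dropWhile_le pvNonBlank rest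
  omega

-- ===== VERDICT (by name: the statement is the Claim_ definition above) =====
theorem get_sentences_from_iob_format_spec : Claim_equal_get_sentences_from_iob_format := by
  intro lines _
  unfold Spec_get_sentences_from_iob_format get_sentences_from_iob_format
  rw [pvLoopA_eq, pvC_nil_eq]
  simp
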